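-- pv_equiv track=rewrite | github.com/josix/NEPT | experiment/converage_experiment.py | eval_unseen_events_num
-- ===== SOURCE A (Python) =====
-- def eval_unseen_events_num(rec_list, seen_set, unseen_set):
--     seen_count = 0
--     unseen_count = 0
--     for item in rec_list:
--         if item in seen_set:
--             seen_count += 1
--         if item in unseen_set:
--             unseen_count += 1
--     return (seen_count, unseen_count)
-- ===== SOURCE B (Python) =====
-- def eval_unseen_events_num(rec_list, seen_set, unseen_set):
--     counts = {}
--     for item in rec_list:
--         counts[item] = counts.get(item, 0) + 1
--     seen_count = sum(counts.get(x, 0) for x in set(seen_set))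
--     unseen_count = sum(counts.get(x, 0) for x in set(unseen_set))
--     return (seen_count, unseen_count)
-- ===== Notes on version B (the rewrite author's own statement) =====
-- stated objective: alternative
-- what changed: B builds a frequency dict of rec_list once and sums the counts over the deduplicated seen/unseen sets, instead of A's per-item membership tests against the two sets.
import Mathlib
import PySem

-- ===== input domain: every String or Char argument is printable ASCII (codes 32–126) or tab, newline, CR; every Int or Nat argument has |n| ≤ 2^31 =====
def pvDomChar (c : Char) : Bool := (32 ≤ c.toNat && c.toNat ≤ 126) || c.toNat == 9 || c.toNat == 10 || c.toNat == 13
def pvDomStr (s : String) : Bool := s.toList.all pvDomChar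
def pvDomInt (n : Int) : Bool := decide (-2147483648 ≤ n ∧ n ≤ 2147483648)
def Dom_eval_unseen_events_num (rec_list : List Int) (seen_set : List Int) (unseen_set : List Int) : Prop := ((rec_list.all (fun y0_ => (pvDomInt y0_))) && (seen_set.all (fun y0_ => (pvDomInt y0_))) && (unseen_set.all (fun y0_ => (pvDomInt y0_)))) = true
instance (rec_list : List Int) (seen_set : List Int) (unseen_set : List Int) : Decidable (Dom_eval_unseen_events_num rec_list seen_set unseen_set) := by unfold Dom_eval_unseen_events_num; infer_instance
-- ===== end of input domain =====

-- ===== PORT A =====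
-- B differs from A by decomposition: one frequency-dict pass over rec_list, then sums over the deduplicated sets.
def eval_unseen_events_num (rec_list : List Int) (seen_set : List Int) (unseen_set : List Int) : Int × Int :=
  rec_list.foldl
    (fun acc item =>
      let acc1 := if item ∈ seen_set then (acc.1 + 1, acc.2) else acc
      if item ∈ unseen_set then (acc1.1, acc1.2 + 1) else acc1)
    (0, 0)

-- ===== PORT B =====
def eval_unseen_events_num_alt (rec_list : List Int) (seen_set : List Int) (unseen_set : List Int) : Int × Int :=
  let counts : PySem.Dict Int Int :=
    rec_list.foldl (fun d x => d.insert x (d.getD x 0 + 1)) PySem.Dict.empty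
  let seen_count := (PySem.Set.ofList seen_set).foldl (fun s x => s + counts.getD x 0) 0
  let unseen_count := (PySem.Set.ofList unseen_set).foldl (fun s x => s + counts.getD x 0) 0
  (seen_count, unseen_count)

-- ===== PRECONDITION & SPEC =====
def Spec_eval_unseen_events_num (rec_list : List Int) (seen_set : List Int) (unseen_set : List Int) (out : Int × Int) : Prop := out = eval_unseen_events_num_alt rec_list seen_set unseen_set
instance (rec_list : List Int) (seen_set : List Int) (unseen_set : List Int) (out : Int × Int) : Decidable (Spec_eval_unseen_events_num rec_list seen_set unseen_set out) := by unfold Spec_eval_unseen_events_num; infer_instance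

-- ===== CLAIM =====
def Claim_equal_eval_unseen_events_num : Prop := ∀ (rec_list : List Int) (seen_set : List Int) (unseen_set : List Int), Dom_eval_unseen_events_num rec_list seen_set unseen_set → Spec_eval_unseen_events_num rec_list seen_set unseen_set (eval_unseen_events_num rec_list seen_set unseen_set)

-- ===== LEMMAS AND PROOFS =====

-- A's fold, characterised: each component is a countP over rec_list.
theorem evalA_foldl (rec_list seen_set unseen_set : List Int) (a b : Int) :
    rec_list.foldl
      (fun acc item =>
        let acc1 := if item ∈ seen_set then (acc.1 + 1, acc.2) else acc
        if item ∈ unseen_set then (acc1.1, acc1.2 + 1) else acc1)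
      (a, b)
    = (a + (rec_list.countP (fun y => decide (y ∈ seen_set)) : Int),
       b + (rec_list.countP (fun y => decide (y ∈ unseen_set)) : Int)) := by
  induction rec_list generalizing a b with
  | nil => simp
  | cons x t ih =>
    simp only [List.foldl_cons, List.countP_cons]
    by_cases hs : x ∈ seen_set <;> by_cases hu : x ∈ unseen_set <;>
      simp [hs, hu, ih, Prod.ext_iff] <;> omega

-- sum over a nodup list of an indicator
theorem sum_indicator (s : List Int) (hs : s.Nodup) (a : Int) :
    (s.map (fun x => if x = a then (1 : Int) else 0)).sum = if a ∈ s then 1 else 0 := by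
  induction s with
  | nil => simp
  | cons y t ih =>
    have ht := ih hs.of_cons
    by_cases hya : y = a
    · subst hya
      have hnt : y ∉ t := (List.nodup_cons.mp hs).1
      simp [hnt, ht]
    · simp [hya, ht, Ne.symm hya]

-- sum of multiplicities over a nodup list = countP of membership
theorem sum_count (rec_list s : List Int) (hs : s.Nodup) :
    (s.map (fun x => (rec_list.count x : Int))).sum
      = (rec_list.countP (fun y => decide (y ∈ s)) : Int) := by
  induction rec_list with
  | nil => simp
  | cons x t ih =>
    have hstep : (s.map (fun v => ((x :: t).count v : Int))).sum
        = (s.map (fun v => (t.count v : Int))).sum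
          + (s.map (fun v => if v = x then (1 : Int) else 0)).sum := by
      rw [← List.sum_map_add]
      apply congrArg List.sum
      apply List.map_congr_left
      intro v _
      rw [List.count_cons]
      by_cases hvx : v = x
      · simp [hvx]
      · simp [hvx]; omega
    rw [hstep, ih, sum_indicator s hs x, List.countP_cons]
    by_cases hx : x ∈ s <;> simp [hx]

-- a foldl-sum is a map-sum
theorem foldl_add_map (s : List Int) (f : Int → Int) (a : Int) :
    s.foldl (fun acc x => acc + f x) a = a + (s.map f).sum := by
  induction s generalizing a with
  | nil => simp
  | cons y t ih => simp [ih]; ring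

-- ===== VERDICT =====
theorem eval_unseen_events_num_spec : Claim_equal_eval_unseen_events_num := by
  intro rec_list seen_set unseen_set _
  unfold Spec_eval_unseen_events_num eval_unseen_events_num eval_unseen_events_num_alt
  have hc : ∀ x : Int,
      (rec_list.foldl (fun d x => d.insert x (d.getD x 0 + 1)) PySem.Dict.empty).getD x 0
        = (rec_list.count x : Int) := by
    intro x
    rw [PySem.Dict.getD_foldl_insert_add_one, PySem.Dict.getD_empty]
    simp
  have hmem : ∀ (s : List Int),
      rec_list.countP (fun y => decide (y ∈ PySem.Set.ofList s))
        = rec_list.countP (fun y => decide (y ∈ s)) := by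
    intro s
    apply List.countP_congr
    intro y _
    simp [PySem.Set.mem_ofList]
  simp only [hc, evalA_foldl]
  rw [foldl_add_map, foldl_add_map,
      sum_count rec_list _ (PySem.Set.nodup_ofList seen_set),
      sum_count rec_list _ (PySem.Set.nodup_ofList unseen_set),
      hmem, hmem]
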